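-- pv_equiv track=rewrite | github.com/alo-ngh/iea_scraper_limited | iea_scraper/core/ts.py | get_one_mapping
-- ===== SOURCE A (Python) =====
-- def get_one_mapping(text, maps):
--     mapping = {}
--     for dimension, dim_maps in maps.items():
--         first_word = float('inf')
--         for code, vocab_list in dim_maps.items():
--             for vocab in vocab_list:
--                 position = text.find(vocab)
--                 if (position > -1) and (position < first_word):
--                     mapping[dimension] = code
--                     first_word = position
--     return mapping
-- ===== SOURCE B (Python) =====
-- def get_one_mapping(text, maps):
--     # Position-major scan: walk the text left to right; for each dimension the
--     # winning code is the first code (in dict order) having a vocab that starts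
--     # at the smallest such position.
--     result = {}
--     n = len(text)
--     for dimension, dim_maps in maps.items():
--         found = None
--         for p in range(n + 1):
--             for code, vocab_list in dim_maps.items():
--                 if any(text.startswith(v, p) for v in vocab_list):
--                     found = code
--                     break
--             if found is not None:
--                 break
--         if found is not None:
--             result[dimension] = found
--     return result
-- ===== Notes on version B (the rewrite author's own statement) =====
-- stated objective: faster
-- what changed: A is vocab-major: for every code it runs text.find(vocab) over the whole text and threads a float('inf') running minimum with in-loop dict writes; B is position-major: it walks the text positions left to right and stops at the first position where any vocab of some code starts (text.startswith(vocab, p)), so it is output-sensitive and never scans past the earliest match.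
import Mathlib
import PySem

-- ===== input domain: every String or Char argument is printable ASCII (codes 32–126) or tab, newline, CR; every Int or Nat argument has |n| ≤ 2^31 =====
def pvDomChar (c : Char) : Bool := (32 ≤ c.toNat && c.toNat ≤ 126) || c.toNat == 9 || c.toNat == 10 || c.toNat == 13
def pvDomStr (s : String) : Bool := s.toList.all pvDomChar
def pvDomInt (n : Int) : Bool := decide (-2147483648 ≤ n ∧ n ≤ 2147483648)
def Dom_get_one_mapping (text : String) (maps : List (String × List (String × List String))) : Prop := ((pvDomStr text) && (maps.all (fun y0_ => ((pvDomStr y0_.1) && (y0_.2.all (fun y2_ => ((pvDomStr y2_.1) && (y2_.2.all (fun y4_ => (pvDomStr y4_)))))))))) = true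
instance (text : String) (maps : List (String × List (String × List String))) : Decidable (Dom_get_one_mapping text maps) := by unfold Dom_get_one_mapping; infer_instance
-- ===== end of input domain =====

-- A searches vocab-major with text.find and a float('inf') running minimum; B scans the text
-- positions left to right and stops at the first position where any vocab of some code starts
-- (position-major, no find calls) — same result, a different traversal.

-- ===== PORT A =====
-- float('inf') sentinel ported as Option Int (none = inf); 'position < first_word' is ltInfA
def ltInfA (p : Int) : Option Int → Bool
  | none => true
  | some fw => decide (p < fw)

-- innermost loop body: 'for vocab in vocab_list: …'
def stepV_A (text dimension code : String) (st : PySem.Dict String String × Option Int) (vocab : String) :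
    PySem.Dict String String × Option Int :=
  let position := PySem.Str.find text vocab
  if decide (position > -1) && ltInfA position st.2 then (st.1.insert dimension code, some position) else st

-- 'for code, vocab_list in dim_maps.items(): …'
def stepC_A (text dimension : String) (st : PySem.Dict String String × Option Int)
    (cv : String × List String) : PySem.Dict String String × Option Int :=
  cv.2.foldl (stepV_A text dimension cv.1) st

-- one iteration of 'for dimension, dim_maps in maps.items(): first_word = float("inf"); …'
def dimStep_A (text : String) (mapping : PySem.Dict String String)
    (dm : String × List (String × List String)) : PySem.Dict String String :=
  (dm.2.foldl (stepC_A text dm.1) (mapping, (none : Option Int))).1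

def get_one_mapping (text : String) (maps : List (String × List (String × List String))) : List (String × String) :=
  (maps.foldl (dimStep_A text) PySem.Dict.empty).items

-- ===== PORT B =====
-- 'text.startswith(v, p)' ported by hand as startswith on the dropped tail; exact for the
-- 0 ≤ p ≤ len(text) this program uses (Python: startswith(v, p) ≡ text[p:].startswith(v) there)
def startsAt_B (tl : List Char) (p : Nat) (v : String) : Bool :=
  PySem.Chars.startswith (tl.drop p) v.toList

-- inner 'for code, vocab_list in dim_maps.items(): if any(...): found = code; break'
def codeAt_B (tl : List Char) (p : Nat) : List (String × List String) → Option String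
  | [] => none
  | cv :: rest => if cv.2.any (startsAt_B tl p) then some cv.1 else codeAt_B tl p rest

-- 'for p in range(n + 1): …; if found is not None: break'  (p is never negative, so Nat range)
def scanPos_B (tl : List Char) (dms : List (String × List String)) : List Nat → Option String
  | [] => none
  | p :: ps =>
    match codeAt_B tl p dms with
    | some c => some c
    | none => scanPos_B tl dms ps

def get_one_mapping_alt (text : String) (maps : List (String × List (String × List String))) : List (String × String) :=
  (maps.foldl
    (fun (result : PySem.Dict String String) dm =>
      match scanPos_B text.toList dm.2 (List.range (text.toList.length + 1)) with
      | none => result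
      | some c => result.insert dm.1 c)
    PySem.Dict.empty).items

-- ===== PRECONDITION & SPEC =====
def Spec_get_one_mapping (text : String) (maps : List (String × List (String × List String))) (out : List (String × String)) : Prop := out = get_one_mapping_alt text maps
instance (text : String) (maps : List (String × List (String × List String))) (out : List (String × String)) : Decidable (Spec_get_one_mapping text maps out) := by unfold Spec_get_one_mapping; infer_instance

-- ===== CLAIM (what is proved, stated in full; the proofs are below) =====
def Claim_equal_get_one_mapping : Prop := ∀ (text : String) (maps : List (String × List (String × List String))), Dom_get_one_mapping text maps → Spec_get_one_mapping text maps (get_one_mapping text maps)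

-- ===== LEMMAS AND PROOFS =====

theorem ltInfA_none (p : Int) : ltInfA p none = true := rfl
theorem ltInfA_some (p f : Int) : ltInfA p (some f) = decide (p < f) := rfl

-- 'first position of vocab v in the text', the quantity both programs are secretly about
def gfind (tl : List Char) (v : String) : Int := PySem.Chars.find tl v.toList

theorem foldl_min_min (t : List Int) (a b : Int) :
    t.foldl min (min a b) = min a (t.foldl min b) := by
  induction t generalizing b with
  | nil => rfl
  | cons c t ih => simpa [List.foldl, min_assoc] using ih (min b c)

theorem min?_id_cons_min (x : Int) (t : List Int) :
    PySem.List.min? (x :: t) (fun y => y) =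
      some (match PySem.List.min? t (fun y => y) with | none => x | some m => min x m) := by
  cases t with
  | nil => rfl
  | cons y t' =>
    rw [PySem.List.min?_id_cons, PySem.List.min?_id_cons]
    simp only [List.foldl_cons, foldl_min_min]

-- min matching first-position over a vocab list, abstract in the find function g
def mposB (g : String → Int) (vl : List String) : Option Int :=
  PySem.List.min? ((vl.map (fun v => g v)).filter (fun p => decide (0 ≤ p))) (fun x => x)

theorem mposB_cons (g : String → Int) (v : String) (vl : List String) :
    mposB g (v :: vl) =
      if 0 ≤ g v then
        some (match mposB g vl with | none => g v | some m => min (g v) m)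
      else mposB g vl := by
  unfold mposB
  simp only [List.map_cons, List.filter_cons]
  by_cases h : 0 ≤ g v
  · simp only [h, decide_true, if_true, min?_id_cons_min]
  · simp only [h, decide_false, Bool.false_eq_true, if_false]

-- A's innermost loop body, as a propositional if over an abstract find function
def vstep (g : String → Int) (dimension code : String)
    (st : PySem.Dict String String × Option Int) (v : String) :
    PySem.Dict String String × Option Int :=
  if 0 ≤ g v ∧ ltInfA (g v) st.2 = true then (st.1.insert dimension code, some (g v)) else st

theorem stepV_A_eq_vstep (text dimension code : String)
    (st : PySem.Dict String String × Option Int) (v : String) :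
    stepV_A text dimension code st v = vstep (gfind text.toList) dimension code st v := by
  unfold stepV_A vstep
  rw [show PySem.Str.find text v = gfind text.toList v from PySem.Str.find_eq text v]
  by_cases h : 0 ≤ gfind text.toList v ∧ ltInfA (gfind text.toList v) st.2 = true
  · have hb : (decide (gfind text.toList v > -1) && ltInfA (gfind text.toList v) st.2) = true := by
      rw [Bool.and_eq_true, decide_eq_true_eq]
      exact ⟨by have := h.1; omega, h.2⟩
    rw [if_pos hb, if_pos h]
  · rw [if_neg h, if_neg]
    intro hcond
    rw [Bool.and_eq_true, decide_eq_true_eq] at hcond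
    exact h ⟨by have := hcond.1; omega, hcond.2⟩

-- A's innermost vocab loop, characterised by the min matching position
theorem innerA_eq (g : String → Int) (dimension code : String) (vl : List String)
    (d : PySem.Dict String String) (fw : Option Int) :
    vl.foldl (vstep g dimension code) (d, fw) =
      match mposB g vl with
      | none => (d, fw)
      | some m => if ltInfA m fw then (d.insert dimension code, some m) else (d, fw) := by
  induction vl generalizing d fw with
  | nil => rfl
  | cons v vl ih =>
    rw [List.foldl_cons, mposB_cons]
    by_cases hp : 0 ≤ g v
    · rw [if_pos hp]
      by_cases hlt : ltInfA (g v) fw = true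
      · rw [show vstep g dimension code (d, fw) v = (d.insert dimension code, some (g v)) from if_pos ⟨hp, hlt⟩, ih]
        cases hmv : mposB g vl with
        | none => dsimp only; rw [hlt, if_pos rfl]
        | some m =>
          dsimp only
          by_cases hm : m < g v
          · have h3 : ltInfA m fw = true := by
              cases fw with
              | none => rfl
              | some f0 => rw [ltInfA_some] at hlt ⊢; simp only [decide_eq_true_eq] at *; omega
            rw [show ltInfA m (some (g v)) = true by rw [ltInfA_some]; simpa using hm, if_pos rfl,
                show min (g v) m = m by omega, if_pos h3, PySem.Dict.insert_insert_self]
          · rw [show ltInfA m (some (g v)) = false by rw [ltInfA_some]; simpa using hm,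
                show min (g v) m = g v by omega]
            simp only [Bool.false_eq_true, if_false, hlt, if_true]
      · cases fw with
        | none => exact absurd (ltInfA_none (g v)) hlt
        | some f0 =>
          rw [ltInfA_some] at hlt; simp only [decide_eq_true_eq] at hlt
          rw [show vstep g dimension code (d, some f0) v = (d, some f0) by
            unfold vstep; rw [if_neg]; rintro ⟨-, h⟩; rw [ltInfA_some] at h; simp at h; omega, ih]
          cases hmv : mposB g vl with
          | none =>
            dsimp only
            rw [show ltInfA (g v) (some f0) = false by rw [ltInfA_some]; simp; omega]
            simp only [Bool.false_eq_true, if_false]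
          | some m =>
            dsimp only
            by_cases hm : m < f0
            · rw [show ltInfA m (some f0) = true by rw [ltInfA_some]; simpa using hm,
                  show min (g v) m = m by omega, if_pos rfl,
                  show ltInfA m (some f0) = true by rw [ltInfA_some]; simpa using hm, if_pos rfl]
            · rw [show ltInfA m (some f0) = false by rw [ltInfA_some]; simpa using hm,
                  show ltInfA (min (g v) m) (some f0) = false by rw [ltInfA_some]; simp; omega]
              simp only [Bool.false_eq_true, if_false]
    · rw [if_neg hp, show vstep g dimension code (d, fw) v = (d, fw) from if_neg (fun h => hp h.1)]
      exact ih d fw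

-- running best (position, code) over the codes — the selection both programs compute
def bstep (g : String → Int) (best : Option (Int × String)) (cv : String × List String) :
    Option (Int × String) :=
  match mposB g cv.2 with
  | none => best
  | some p =>
    match best with
    | none => some (p, cv.1)
    | some b => if p < b.1 then some (p, cv.1) else some b

-- B's running best, read back as A's dict state
def dStateB (dimension : String) (d0 : PySem.Dict String String) :
    Option (Int × String) → PySem.Dict String String
  | none => d0
  | some b => d0.insert dimension b.2

theorem midA_eq (g : String → Int) (dimension : String) (dms : List (String × List String))
    (d0 : PySem.Dict String String) (b : Option (Int × String)) :
    dms.foldl (fun st cv => cv.2.foldl (vstep g dimension cv.1) st)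
        (dStateB dimension d0 b, b.map (·.1)) =
      (dStateB dimension d0 (dms.foldl (bstep g) b), (dms.foldl (bstep g) b).map (·.1)) := by
  induction dms generalizing b with
  | nil => rfl
  | cons cv dms ih =>
    rw [List.foldl_cons, List.foldl_cons, innerA_eq]
    have hb : bstep g b cv =
        match mposB g cv.2 with
        | none => b
        | some p =>
          match b with
          | none => some (p, cv.1)
          | some bb => if p < bb.1 then some (p, cv.1) else some bb := rfl
    cases hmv : mposB g cv.2 with
    | none =>
      rw [show bstep g b cv = b by rw [hb, hmv]]
      dsimp only
      exact ih b
    | some m =>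
      cases b with
      | none =>
        rw [show bstep g none cv = some (m, cv.1) by rw [hb, hmv]]
        dsimp only
        rw [if_pos (show ltInfA m (Option.map (fun x => x.1) (none : Option (Int × String))) = true from rfl)]
        exact ih (some (m, cv.1))
      | some bb =>
        dsimp only
        by_cases hm : m < bb.1
        · rw [show bstep g (some bb) cv = some (m, cv.1) by rw [hb, hmv]; simp [hm],
              if_pos (show ltInfA m (Option.map (fun x => x.1) (some bb)) = true by
                rw [show Option.map (fun x => x.1) (some bb) = some bb.1 from rfl, ltInfA_some]
                simpa using hm)]
          rw [show (dStateB dimension d0 (some bb)).insert dimension cv.1 = dStateB dimension d0 (some (m, cv.1)) by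
                dsimp only [dStateB]; rw [PySem.Dict.insert_insert_self]]
          exact ih (some (m, cv.1))
        · rw [show bstep g (some bb) cv = some bb by rw [hb, hmv]; simp [hm],
              if_neg (show ¬ ltInfA m (Option.map (fun x => x.1) (some bb)) = true by
                rw [show Option.map (fun x => x.1) (some bb) = some bb.1 from rfl, ltInfA_some]
                simpa using hm)]
          exact ih (some bb)

-- ===== linking B's position-major scan with the same selection =====

-- a match at p is a prefix of the p-suffix, hence an occurrence somewhere
theorem startsAt_infix {tl : List Char} {p : Nat} {v : String}
    (h : startsAt_B tl p v = true) : v.toList <:+: tl := by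
  unfold startsAt_B at h
  rw [PySem.Chars.startswith_iff] at h
  exact h.isInfix.trans (tl.drop_suffix p).isInfix

theorem mposB_none_no_match {tl : List Char} {vl : List String}
    (h : mposB (gfind tl) vl = none) (p : Nat) : vl.any (startsAt_B tl p) = false := by
  unfold mposB at h
  rw [PySem.List.min?_eq_none_iff, List.filter_eq_nil_iff] at h
  rw [List.any_eq_false]
  intro v hv hs
  have h1 : ¬ (0 ≤ gfind tl v) := by
    have := h (gfind tl v) (List.mem_map.mpr ⟨v, hv, rfl⟩)
    simpa using this
  exact h1 ((PySem.Chars.find_nonneg_iff tl v.toList).mpr (startsAt_infix hs))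

theorem mposB_some_spec {tl : List Char} {vl : List String} {m : Int}
    (h : mposB (gfind tl) vl = some m) :
    0 ≤ m ∧ m.toNat ≤ tl.length ∧ vl.any (startsAt_B tl m.toNat) = true ∧
      ∀ p : Nat, (p : Int) < m → vl.any (startsAt_B tl p) = false := by
  have hmem := PySem.List.min?_mem h
  have hmin := PySem.List.min?_isMin h
  rw [List.mem_filter] at hmem
  obtain ⟨hmap, hpos⟩ := hmem
  obtain ⟨v, hv, hgv⟩ := List.mem_map.mp hmap
  have h0 : 0 ≤ m := by simpa using hpos
  have h0' : 0 ≤ gfind tl v := hgv ▸ h0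
  have hspec := PySem.Chars.find_spec (show 0 ≤ PySem.Chars.find tl v.toList from h0')
  refine ⟨h0, ?_, ?_, ?_⟩
  · have h2 : gfind tl v ≤ (tl.length : Int) := PySem.Chars.find_le_length tl v.toList
    omega
  · rw [List.any_eq_true]
    refine ⟨v, hv, ?_⟩
    unfold startsAt_B
    rw [PySem.Chars.startswith_iff]
    rw [← hgv]
    exact hspec.1
  · intro p hp
    rw [List.any_eq_false]
    intro w hw hsw
    unfold startsAt_B at hsw
    rw [PySem.Chars.startswith_iff] at hsw
    have hw0 : 0 ≤ gfind tl w :=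
      (PySem.Chars.find_nonneg_iff tl w.toList).mpr (hsw.isInfix.trans (tl.drop_suffix p).isInfix)
    have hle : m ≤ gfind tl w := by
      apply hmin
      rw [List.mem_filter]
      exact ⟨List.mem_map.mpr ⟨w, hw, rfl⟩, by simpa using hw0⟩
    have hplt : p < (gfind tl w).toNat := by omega
    exact (PySem.Chars.find_spec (show 0 ≤ PySem.Chars.find tl w.toList from hw0)).2 p hplt hsw

-- accumulator law for the best-selection fold
theorem bstep_acc (g : String → Int) (rest : List (String × List String)) (p : Int) (c : String) :
    rest.foldl (bstep g) (some (p, c)) =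
      match rest.foldl (bstep g) none with
      | none => some (p, c)
      | some qd => if qd.1 < p then some qd else some (p, c) := by
  induction rest generalizing p c with
  | nil => rfl
  | cons cv rest ih =>
    rw [List.foldl_cons, List.foldl_cons]
    cases hmv : mposB g cv.2 with
    | none =>
      rw [show bstep g (some (p, c)) cv = some (p, c) by unfold bstep; rw [hmv],
          show bstep g none cv = none by unfold bstep; rw [hmv]]
      exact ih p c
    | some r =>
      rw [show bstep g (some (p, c)) cv = if r < p then some (r, cv.1) else some (p, c) by
            unfold bstep; rw [hmv],
          show bstep g none cv = some (r, cv.1) by unfold bstep; rw [hmv]]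
      by_cases hr : r < p
      · rw [if_pos hr, ih r cv.1]
        cases rest.foldl (bstep g) none with
        | none => dsimp only; rw [if_pos hr]
        | some qd =>
          dsimp only
          by_cases hq : qd.1 < r
          · rw [if_pos hq]; dsimp only; rw [if_pos (show qd.1 < p by omega)]
          · rw [if_neg hq]; dsimp only; rw [if_pos hr]
      · rw [if_neg hr, ih p c, ih r cv.1]
        cases rest.foldl (bstep g) none with
        | none => dsimp only; rw [if_neg hr]
        | some qd =>
          dsimp only
          by_cases hq : qd.1 < r
          · rw [if_pos hq]
          · rw [if_neg hq]; dsimp only; rw [if_neg (show ¬ qd.1 < p by omega), if_neg hr]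

theorem best_none_spec {tl : List Char} {dms : List (String × List String)}
    (h : dms.foldl (bstep (gfind tl)) none = none) (p : Nat) : codeAt_B tl p dms = none := by
  induction dms with
  | nil => rfl
  | cons cv rest ih =>
    rw [List.foldl_cons] at h
    cases hmv : mposB (gfind tl) cv.2 with
    | none =>
      rw [show bstep (gfind tl) none cv = none by unfold bstep; rw [hmv]] at h
      unfold codeAt_B
      rw [mposB_none_no_match hmv p]
      simpa using ih h
    | some r =>
      rw [show bstep (gfind tl) none cv = some (r, cv.1) by unfold bstep; rw [hmv],
          bstep_acc] at h
      cases hres : rest.foldl (bstep (gfind tl)) none <;> rw [hres] at h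
      · exact absurd h (by simp)
      · revert h; dsimp only; split <;> simp

theorem best_some_spec {tl : List Char} {dms : List (String × List String)} {m : Int} {c : String}
    (h : dms.foldl (bstep (gfind tl)) none = some (m, c)) :
    0 ≤ m ∧ m.toNat ≤ tl.length ∧ (∀ p : Nat, (p : Int) < m → codeAt_B tl p dms = none) ∧
      codeAt_B tl m.toNat dms = some c := by
  induction dms generalizing m c with
  | nil => exact absurd h (by simp)
  | cons cv rest ih =>
    rw [List.foldl_cons] at h
    cases hmv : mposB (gfind tl) cv.2 with
    | none =>
      rw [show bstep (gfind tl) none cv = none by unfold bstep; rw [hmv]] at h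
      obtain ⟨h0, hlen, hlt, hat⟩ := ih h
      refine ⟨h0, hlen, ?_, ?_⟩
      · intro p hp
        unfold codeAt_B
        rw [mposB_none_no_match hmv p]
        simpa using hlt p hp
      · unfold codeAt_B
        rw [mposB_none_no_match hmv m.toNat]
        simpa using hat
    | some r =>
      obtain ⟨hr0, hrlen, hrat, hrlt⟩ := mposB_some_spec hmv
      rw [show bstep (gfind tl) none cv = some (r, cv.1) by unfold bstep; rw [hmv],
          bstep_acc] at h
      cases hres : rest.foldl (bstep (gfind tl)) none <;> rw [hres] at h
      · -- no later code matches anywhere; head code wins at r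
        dsimp only at h
        obtain ⟨hm, hc⟩ : r = m ∧ cv.1 = c := by simpa [Prod.ext_iff] using h
        subst hm; subst hc
        refine ⟨hr0, hrlen, ?_, ?_⟩
        · intro p hp
          unfold codeAt_B
          rw [hrlt p hp]
          simpa using best_none_spec hres p
        · unfold codeAt_B
          rw [hrat]
          rfl
      · rename_i qd
        obtain ⟨hq0, hqlen, hqlt, hqat⟩ := ih hres
        dsimp only at h
        by_cases hq : qd.1 < r
        · rw [if_pos hq] at h
          obtain ⟨hm, hc⟩ : qd.1 = m ∧ qd.2 = c := by
            rw [show some qd = some (qd.1, qd.2) from rfl] at h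
            simpa [Prod.ext_iff] using h
          refine ⟨hm ▸ hq0, hm ▸ hqlen, ?_, ?_⟩
          · intro p hp
            unfold codeAt_B
            rw [hrlt p (by omega)]
            simpa using hqlt p (by omega)
          · unfold codeAt_B
            rw [hrlt m.toNat (by omega), ← hm, ← hc]
            simpa using hqat
        · rw [if_neg hq] at h
          obtain ⟨hm, hc⟩ : r = m ∧ cv.1 = c := by simpa [Prod.ext_iff] using h
          subst hm; subst hc
          refine ⟨hr0, hrlen, ?_, ?_⟩
          · intro p hp
            unfold codeAt_B
            rw [hrlt p hp]
            simpa using hqlt p (by omega)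
          · unfold codeAt_B
            rw [hrat]
            rfl

-- scanning a concatenation of position lists
theorem scanPos_append (tl : List Char) (dms : List (String × List String)) (l1 l2 : List Nat) :
    scanPos_B tl dms (l1 ++ l2) =
      match scanPos_B tl dms l1 with
      | some c => some c
      | none => scanPos_B tl dms l2 := by
  induction l1 with
  | nil => rfl
  | cons p l1 ih =>
    rw [List.cons_append]
    have hL : ∀ ps, scanPos_B tl dms (p :: ps) =
        (match codeAt_B tl p dms with | some c => some c | none => scanPos_B tl dms ps) :=
      fun ps => rfl
    rw [hL, hL]
    cases codeAt_B tl p dms with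
    | some c => rfl
    | none => exact ih

theorem scanPos_none (tl : List Char) (dms : List (String × List String)) (ps : List Nat)
    (h : ∀ p ∈ ps, codeAt_B tl p dms = none) : scanPos_B tl dms ps = none := by
  induction ps with
  | nil => rfl
  | cons p ps ih =>
    unfold scanPos_B
    rw [h p (List.mem_cons_self)]
    exact ih (fun q hq => h q (List.mem_cons_of_mem p hq))

-- B's position-major scan computes exactly the code of the best (position, code) pair
theorem scan_eq_best (tl : List Char) (dms : List (String × List String)) :
    scanPos_B tl dms (List.range (tl.length + 1)) =
      (dms.foldl (bstep (gfind tl)) none).map (·.2) := by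
  cases hb : dms.foldl (bstep (gfind tl)) none with
  | none =>
    rw [Option.map_none]
    exact scanPos_none tl dms _ (fun p _ => best_none_spec hb p)
  | some mc =>
    obtain ⟨h0, hlen, hlt, hat⟩ := best_some_spec (m := mc.1) (c := mc.2) (by rw [hb])
    rw [Option.map_some]
    have hsplit : List.range (tl.length + 1) =
        List.range mc.1.toNat ++ (mc.1.toNat :: List.range' (mc.1.toNat + 1) (tl.length - mc.1.toNat)) := by
      rw [show (mc.1.toNat :: List.range' (mc.1.toNat + 1) (tl.length - mc.1.toNat)) =
            List.range' mc.1.toNat (tl.length - mc.1.toNat + 1) from List.range'_succ.symm]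
      rw [List.range_eq_range', List.range_eq_range']
      rw [show tl.length + 1 = mc.1.toNat + (tl.length - mc.1.toNat + 1) by omega]
      simpa using (List.range'_append (s := 0) (m := mc.1.toNat)
        (n := tl.length - mc.1.toNat + 1) (step := 1)).symm
    rw [hsplit, scanPos_append]
    rw [scanPos_none tl dms _ (fun p hp => hlt p (by
      have := List.mem_range.mp hp; omega))]
    unfold scanPos_B
    rw [hat]

-- one dimension of A equals one dimension of B
theorem dimStep_eq (text : String) (mapping : PySem.Dict String String)
    (dm : String × List (String × List String)) :
    dimStep_A text mapping dm =
      match scanPos_B text.toList dm.2 (List.range (text.toList.length + 1)) with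
      | none => mapping
      | some c => mapping.insert dm.1 c := by
  unfold dimStep_A
  rw [PySem.List.foldl_congr_mem dm.2 (stepC_A text dm.1)
        (fun st cv => cv.2.foldl (vstep (gfind text.toList) dm.1 cv.1) st)
        (mapping, (none : Option Int))
        (fun st cv _ => PySem.List.foldl_congr_mem cv.2 _ _ st
          (fun st' v _ => stepV_A_eq_vstep text dm.1 cv.1 st' v))]
  rw [show ((mapping, (none : Option Int)) : PySem.Dict String String × Option Int) =
      (dStateB dm.1 mapping none, (none : Option (Int × String)).map (·.1)) from rfl]
  rw [midA_eq, scan_eq_best]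
  cases dm.2.foldl (bstep (gfind text.toList)) none <;> rfl

-- ===== VERDICT (by name: the statement is the Claim_ definition above) =====
theorem get_one_mapping_spec : Claim_equal_get_one_mapping := by
  intro text maps _
  unfold Spec_get_one_mapping get_one_mapping get_one_mapping_alt
  rw [PySem.List.foldl_congr_mem maps (dimStep_A text)
      (fun (result : PySem.Dict String String) dm =>
        match scanPos_B text.toList dm.2 (List.range (text.toList.length + 1)) with
        | none => result
        | some c => result.insert dm.1 c)
      PySem.Dict.empty
      (fun acc dm _ => dimStep_eq text acc dm)]
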